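-- pv_equiv track=rewrite | github.com/Babakbehkamkia/Algorithm-Design | A7/coursera/suffix_array_long.py | update_order
-- ===== SOURCE A (Python) =====
-- def update_order(text,L,order,kelas):
--     count=[0 for i in range(len(text))]
--     new_order=[0 for i in range(len(text))]
--     for i in range(len(text)):
--         count[kelas[i]]+=1
--     for i in range(1,len(text)):
--         count[i]+=count[i-1]
--     for i in range(len(text)-1,-1,-1):
--         start=(order[i]-L+len(text))%len(text)
--         cl=kelas[start]
--         count[cl]-=1
--         new_order[count[cl]]=start
--     return new_order
-- ===== SOURCE B (Python) =====
-- def update_order(text, L, order, kelas):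
--     n = len(text)
--     buckets = [[] for _ in range(n)]
--     for i in range(n):
--         start = (order[i] - L + n) % n
--         buckets[kelas[start]].append(start)
--     return [s for b in buckets for s in b]
-- ===== Notes on version B (the rewrite author's own statement) =====
-- stated objective: simpler
-- what changed: Replaces A's count-array counting sort (histogram pass, prefix-sum pass, backward decrement-and-place pass into a preallocated array) by per-class bucket lists filled in one forward pass and concatenated in class order, which yields the same stable ordering.
-- outside the precondition, e.g. on update_order('abc', 0, [0, 0, 1], [0, 1, 2]): A returns [0, 1, 0], B returns [0, 0, 1]
import Mathlib
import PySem

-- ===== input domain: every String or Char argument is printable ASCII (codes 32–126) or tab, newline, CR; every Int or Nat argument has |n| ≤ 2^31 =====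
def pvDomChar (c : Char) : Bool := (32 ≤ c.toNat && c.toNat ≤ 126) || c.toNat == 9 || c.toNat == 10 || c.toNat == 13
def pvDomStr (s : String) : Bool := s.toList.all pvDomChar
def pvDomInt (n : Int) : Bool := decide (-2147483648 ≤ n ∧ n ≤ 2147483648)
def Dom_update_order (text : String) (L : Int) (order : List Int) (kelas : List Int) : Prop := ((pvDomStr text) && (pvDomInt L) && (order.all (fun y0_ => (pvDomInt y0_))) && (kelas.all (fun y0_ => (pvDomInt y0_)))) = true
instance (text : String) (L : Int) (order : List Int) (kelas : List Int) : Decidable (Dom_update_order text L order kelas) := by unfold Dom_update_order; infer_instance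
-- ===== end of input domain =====

-- B replaces A's count-array/prefix-sum/backward-placement counting sort by per-class bucket
-- lists filled in one forward pass and concatenated in class order (same stable result, simpler).

-- ===== PORT A =====
def update_order (text : String) (L : Int) (order : List Int) (kelas : List Int) : List Int :=
  let n := text.toList.length
  let count : List Int := List.replicate n 0
  let new_order : List Int := List.replicate n 0
  let count := (List.range n).foldl (fun cnt i =>
      PySem.List.pySetD cnt (kelas.getD i 0)
        (PySem.List.pyGetD cnt (kelas.getD i 0) 0 + 1)) count
  let count := (List.range' 1 (n - 1)).foldl (fun cnt i =>
      cnt.set i (cnt.getD i 0 + cnt.getD (i - 1) 0)) count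
  let p := (List.range n).reverse.foldl (fun (p : List Int × List Int) i =>
      let start := PySem.Int.mod (order.getD i 0 - L + (n : Int)) (n : Int)
      let cl := kelas.getD start.toNat 0
      let cv := PySem.List.pyGetD p.1 cl 0 - 1
      (PySem.List.pySetD p.1 cl cv, PySem.List.pySetD p.2 cv start)) (count, new_order)
  p.2

-- ===== PORT B =====
def update_order_alt (text : String) (L : Int) (order : List Int) (kelas : List Int) : List Int :=
  let n := text.toList.length
  let buckets : List (List Int) := List.replicate n []
  let buckets := (List.range n).foldl (fun bs i =>
      let start := PySem.Int.mod (order.getD i 0 - L + (n : Int)) (n : Int)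
      let cl := kelas.getD start.toNat 0
      PySem.List.pySetD bs cl (PySem.List.pyGetD bs cl [] ++ [start])) buckets
  buckets.flatten

-- ===== PRECONDITION & SPEC =====
-- Pre_ restricts to the suffix-array invariants this helper is called under: order/kelas cover the
-- text, each class value is a valid index (Python IndexError otherwise), and the shifted order
-- values are distinct modulo len(text).  It thereby also excludes inputs with colliding shifted
-- order values, on which A still returns: there A's placement loop overwrites slots and leaves
-- zero-initialised entries — an accident of the count/placement implementation, not a specified value.
def Pre_update_order (text : String) (L : Int) (order : List Int) (kelas : List Int) : Prop :=
  let n := text.toList.length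
  n ≤ order.length ∧ n ≤ kelas.length ∧
  (∀ i < n, -(n : Int) ≤ kelas.getD i 0 ∧ kelas.getD i 0 < (n : Int)) ∧
  ((List.range n).map (fun i => PySem.Int.mod (order.getD i 0 - L + (n : Int)) (n : Int))).Nodup
instance (text : String) (L : Int) (order : List Int) (kelas : List Int) : Decidable (Pre_update_order text L order kelas) := by unfold Pre_update_order; infer_instance
def pvWitness_update_order : String × Int × List Int × List Int := ("ab", 1, [1, 0], [1, -1])
def Spec_update_order (text : String) (L : Int) (order : List Int) (kelas : List Int) (out : List Int) : Prop := out = update_order_alt text L order kelas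
instance (text : String) (L : Int) (order : List Int) (kelas : List Int) (out : List Int) : Decidable (Spec_update_order text L order kelas out) := by unfold Spec_update_order; infer_instance

-- ===== CLAIM (what is proved, stated in full; the proofs are below) =====
def Claim_equal_update_order : Prop := ∀ (text : String) (L : Int) (order : List Int) (kelas : List Int), Dom_update_order text L order kelas → Pre_update_order text L order kelas → Spec_update_order text L order kelas (update_order text L order kelas)

-- ===== LEMMAS AND PROOFS =====

-- Python index semantics: an index v with -n ≤ v < n addresses position eIdx n v.
def eIdx (n : Nat) (v : Int) : Nat := if 0 ≤ v then v.toNat else (v + (n : Int)).toNat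

-- per-class bucket of a list of starts, and the flattened first m buckets
def bucket (key : Int → Nat) (ss : List Int) (c : Nat) : List Int :=
  ss.filter (fun s => decide (key s = c))
def FlatN (key : Int → Nat) (ss : List Int) (m : Nat) : List Int :=
  ((List.range m).map (bucket key ss)).flatten
def PosB (key : Int → Nat) (ss : List Int) (c : Nat) : Nat := (FlatN key ss c).length

-- the body of A's backward placement loop, with the class lookup abstracted as kvf
def stepA (kvf : Int → Int) (s : Int) (p : List Int × List Int) : List Int × List Int :=
  (PySem.List.pySetD p.1 (kvf s) (PySem.List.pyGetD p.1 (kvf s) 0 - 1),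
   PySem.List.pySetD p.2 (PySem.List.pyGetD p.1 (kvf s) 0 - 1) s)

theorem eIdx_lt (n : Nat) (v : Int) (h1 : -(n : Int) ≤ v) (h2 : v < (n : Int)) :
    eIdx n v < n := by
  unfold eIdx; split_ifs <;> omega

theorem getD_set_self {α : Type} (l : List α) (i : Nat) (a d : α) (h : i < l.length) :
    (l.set i a).getD i d = a := by
  simp [List.getD_eq_getElem?_getD, h]

theorem getD_set_ne {α : Type} (l : List α) (i j : Nat) (a d : α) (h : i ≠ j) :
    (l.set i a).getD j d = l.getD j d := by
  simp [List.getD_eq_getElem?_getD, List.getElem?_set_ne h]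

theorem pyGetD_eIdx {α : Type} (xs : List α) (v : Int) (d : α)
    (h1 : -(xs.length : Int) ≤ v) (h2 : v < (xs.length : Int)) :
    PySem.List.pyGetD xs v d = xs.getD (eIdx xs.length v) d := by
  unfold PySem.List.pyGetD PySem.List.pyGet? PySem.List.pyIdx? eIdx
  split_ifs with h0 h1
  · simp [List.getD_eq_getElem?_getD]
  · have hx : xs.length - (-v).toNat = (v + (xs.length : Int)).toNat := by omega
    simp [hx, List.getD_eq_getElem?_getD]

theorem pySetD_eIdx {α : Type} (xs : List α) (v : Int) (a : α)
    (h1 : -(xs.length : Int) ≤ v) (h2 : v < (xs.length : Int)) :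
    PySem.List.pySetD xs v a = xs.set (eIdx xs.length v) a := by
  unfold PySem.List.pySetD PySem.List.pySet? PySem.List.pyIdx? eIdx
  split_ifs with h0 h1
  · simp
  · have hx : xs.length - (-v).toNat = (v + (xs.length : Int)).toNat := by omega
    simp [hx]

-- histogram loop: counts of effective classes
theorem histLoop (n : Nat) (kelas : List Int) :
    ∀ (is' : List Nat) (cnt : List Int), cnt.length = n →
    (∀ i ∈ is', -(n : Int) ≤ kelas.getD i 0 ∧ kelas.getD i 0 < (n : Int)) →
    ((is'.foldl (fun cnt i =>
        PySem.List.pySetD cnt (kelas.getD i 0)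
          (PySem.List.pyGetD cnt (kelas.getD i 0) 0 + 1)) cnt).length = n ∧
     ∀ c < n, (is'.foldl (fun cnt i =>
        PySem.List.pySetD cnt (kelas.getD i 0)
          (PySem.List.pyGetD cnt (kelas.getD i 0) 0 + 1)) cnt).getD c 0
        = cnt.getD c 0 + ((is'.map (fun i => eIdx n (kelas.getD i 0))).count c : Int)) := by
  intro is'
  induction is' with
  | nil => intro cnt hlen hks; exact ⟨hlen, fun c _ => by simp⟩
  | cons i t ih =>
    intro cnt hlen hks
    have hv := hks i (by simp)
    have h1 : -((cnt.length : Nat) : Int) ≤ kelas.getD i 0 := by rw [hlen]; exact hv.1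
    have h2 : kelas.getD i 0 < ((cnt.length : Nat) : Int) := by rw [hlen]; exact hv.2
    rw [List.foldl_cons, pySetD_eIdx _ _ _ h1 h2, pyGetD_eIdx _ _ _ h1 h2, hlen]
    have hlen' : (cnt.set (eIdx n (kelas.getD i 0))
        (cnt.getD (eIdx n (kelas.getD i 0)) 0 + 1)).length = n := by
      simp [hlen]
    obtain ⟨H1, H2⟩ := ih _ hlen' (fun j hj => hks j (by simp [hj]))
    refine ⟨H1, fun c hc => ?_⟩
    rw [H2 c hc]
    by_cases he : eIdx n (kelas.getD i 0) = c
    · rw [he, getD_set_self _ _ _ _ (by rw [hlen]; exact hc)]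
      simp only [List.map_cons, List.count_cons, he]
      push_cast
      simp
      ring
    · rw [getD_set_ne _ _ _ _ _ he]
      simp only [List.map_cons, List.count_cons, beq_iff_eq]
      rw [if_neg he]
      simp

-- prefix-sum loop
theorem psumLoop :
    ∀ (m : Nat) (l : List Int), m + 1 ≤ l.length →
    (((List.range' 1 m).foldl (fun cnt i => cnt.set i (cnt.getD i 0 + cnt.getD (i - 1) 0)) l).length = l.length ∧
     (∀ c, c ≤ m → ((List.range' 1 m).foldl (fun cnt i => cnt.set i (cnt.getD i 0 + cnt.getD (i - 1) 0)) l).getD c 0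
        = ((List.range (c + 1)).map (fun j => l.getD j 0)).sum) ∧
     (∀ c, m < c → ((List.range' 1 m).foldl (fun cnt i => cnt.set i (cnt.getD i 0 + cnt.getD (i - 1) 0)) l).getD c 0
        = l.getD c 0)) := by
  intro m
  induction m with
  | zero =>
    intro l hm
    refine ⟨rfl, fun c hc => ?_, fun c _ => rfl⟩
    interval_cases c
    simp [List.range_succ]
  | succ m ih =>
    intro l hm
    obtain ⟨ih1, ih2, ih3⟩ := ih l (by omega)
    rw [List.range'_concat, List.foldl_append, List.foldl_cons, List.foldl_nil]
    have hidx : 1 + 1 * m = m + 1 := by omega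
    rw [hidx]
    set r := (List.range' 1 m).foldl (fun cnt i => cnt.set i (cnt.getD i 0 + cnt.getD (i - 1) 0)) l with hr
    have hv : r.getD (m + 1) 0 + r.getD (m + 1 - 1) 0
        = l.getD (m + 1) 0 + ((List.range (m + 1)).map (fun j => l.getD j 0)).sum := by
      rw [ih3 (m + 1) (by omega)]
      have : m + 1 - 1 = m := by omega
      rw [this, ih2 m le_rfl]
    refine ⟨by simp [ih1], fun c hc => ?_, fun c hc => ?_⟩
    · by_cases he : c = m + 1
      · subst he
        rw [getD_set_self _ _ _ _ (by rw [ih1]; omega), hv]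
        conv_rhs => rw [List.range_succ]
        simp
        ring
      · rw [getD_set_ne _ _ _ _ _ (fun h => he h.symm)]
        exact ih2 c (by omega)
    · rw [getD_set_ne _ _ _ _ _ (by omega)]
      exact ih3 c (by omega)

theorem countP_lt_succ (cs : List Nat) (c : Nat) :
    cs.countP (fun x => decide (x < c + 1)) = cs.countP (fun x => decide (x < c)) + cs.count c := by
  induction cs with
  | nil => simp
  | cons a t ih =>
    simp only [List.countP_cons, List.count_cons, ih]
    by_cases h1 : a < c + 1 <;> by_cases h2 : a < c <;> by_cases h3 : a = c <;>
      simp [h1, h2, h3] <;> omega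

theorem sum_count_eq_countP (cs : List Nat) (c : Nat) :
    ((List.range c).map (fun j => cs.count j)).sum = cs.countP (fun x => decide (x < c)) := by
  induction c with
  | zero => simp
  | succ c ih =>
    rw [List.range_succ]
    simp only [List.map_append, List.map_cons, List.map_nil, List.sum_append,
      List.sum_cons, List.sum_nil, ih, Nat.add_zero]
    rw [← countP_lt_succ]

-- bucket sizes are class counts
theorem bucket_length (key : Int → Nat) (ss : List Int) (c : Nat) :
    (bucket key ss c).length = (ss.map key).count c := by
  rw [bucket, List.count, List.countP_map, List.countP_eq_length_filter]
  congr 1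

theorem PosB_succ (key : Int → Nat) (ss : List Int) (c : Nat) :
    PosB key ss (c + 1) = PosB key ss c + (bucket key ss c).length := by
  simp [PosB, FlatN, List.range_succ]

theorem PosB_eq_countP (key : Int → Nat) (ss : List Int) (c : Nat) :
    PosB key ss c = (ss.map key).countP (fun x => decide (x < c)) := by
  induction c with
  | zero => simp [PosB, FlatN]
  | succ c ih => rw [PosB_succ, countP_lt_succ, ih, bucket_length]

theorem PosB_total (key : Int → Nat) (ss : List Int) (n : Nat)
    (h : ∀ s ∈ ss, key s < n) : PosB key ss n = ss.length := by
  rw [PosB_eq_countP]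
  rw [show (ss.map key).countP (fun x => decide (x < n)) = (ss.map key).length by
    apply List.countP_eq_length.2; intro x hx
    rcases List.mem_map.1 hx with ⟨s, hs, rfl⟩
    simpa using h s hs]
  simp

theorem PosB_mono (key : Int → Nat) (ss : List Int) {c c' : Nat} (h : c ≤ c') :
    PosB key ss c ≤ PosB key ss c' := by
  rw [PosB_eq_countP, PosB_eq_countP]
  apply List.countP_mono_left
  intro x _ hx
  simp only [decide_eq_true_eq] at *
  omega

-- bucket-fill loop of B
theorem bucketLoop (n : Nat) (kvf : Int → Int) :
    ∀ (ss : List Int) (bs : List (List Int)), bs.length = n →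
    (∀ s ∈ ss, -(n : Int) ≤ kvf s ∧ kvf s < (n : Int)) →
    ((ss.foldl (fun bs s =>
        PySem.List.pySetD bs (kvf s) (PySem.List.pyGetD bs (kvf s) [] ++ [s])) bs).length = n ∧
     ∀ c < n, (ss.foldl (fun bs s =>
        PySem.List.pySetD bs (kvf s) (PySem.List.pyGetD bs (kvf s) [] ++ [s])) bs).getD c []
        = bs.getD c [] ++ ss.filter (fun s => decide (eIdx n (kvf s) = c))) := by
  intro ss
  induction ss with
  | nil => intro bs hlen hks; exact ⟨hlen, fun c _ => by simp⟩
  | cons s t ih =>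
    intro bs hlen hks
    have hv := hks s (by simp)
    have h1 : -((bs.length : Nat) : Int) ≤ kvf s := by rw [hlen]; exact hv.1
    have h2 : kvf s < ((bs.length : Nat) : Int) := by rw [hlen]; exact hv.2
    rw [List.foldl_cons, pySetD_eIdx _ _ _ h1 h2, pyGetD_eIdx _ _ _ h1 h2, hlen]
    have hlen' : (bs.set (eIdx n (kvf s))
        (bs.getD (eIdx n (kvf s)) [] ++ [s])).length = n := by
      simp [hlen]
    obtain ⟨H1, H2⟩ := ih _ hlen' (fun x hx => hks x (by simp [hx]))
    refine ⟨H1, fun c hc => ?_⟩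
    rw [H2 c hc]
    by_cases he : eIdx n (kvf s) = c
    · rw [he, getD_set_self _ _ _ _ (by rw [hlen]; exact hc)]
      rw [List.filter_cons_of_pos (by simp [he])]
      simp
    · rw [getD_set_ne _ _ _ _ _ he]
      rw [List.filter_cons_of_neg (by simp [he])]

-- A's backward placement loop, fully characterised
theorem placeLoop (n : Nat) (kvf : Int → Int) :
    ∀ (ss : List Int) (cnt res : List Int) (pos : Nat → Nat),
    cnt.length = n → res.length = n →
    (∀ s ∈ ss, -(n : Int) ≤ kvf s ∧ kvf s < (n : Int)) →
    (∀ c < n, cnt.getD c 0 = (pos c : Int) + ((ss.filter (fun s => decide (eIdx n (kvf s) = c))).length : Int)) →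
    (∀ c < n, pos c + (ss.filter (fun s => decide (eIdx n (kvf s) = c))).length ≤ n) →
    (∀ c < n, ∀ c' < n, c ≠ c' →
       pos c + (ss.filter (fun s => decide (eIdx n (kvf s) = c))).length ≤ pos c' ∨
       pos c' + (ss.filter (fun s => decide (eIdx n (kvf s) = c'))).length ≤ pos c) →
    ((ss.foldr (stepA kvf) (cnt, res)).1.length = n ∧
     (ss.foldr (stepA kvf) (cnt, res)).2.length = n ∧
     (∀ c < n, (ss.foldr (stepA kvf) (cnt, res)).1.getD c 0 = (pos c : Int)) ∧
     (∀ c < n, ∀ t < (ss.filter (fun s => decide (eIdx n (kvf s) = c))).length,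
        (ss.foldr (stepA kvf) (cnt, res)).2.getD (pos c + t) 0
          = (ss.filter (fun s => decide (eIdx n (kvf s) = c))).getD t 0) ∧
     (∀ j < n, (∀ c < n, j < pos c ∨ pos c + (ss.filter (fun s => decide (eIdx n (kvf s) = c))).length ≤ j) →
        (ss.foldr (stepA kvf) (cnt, res)).2.getD j 0 = res.getD j 0)) := by
  intro ss
  induction ss with
  | nil =>
    intro cnt res pos hlc hlr _ hcnt _ _
    exact ⟨hlc, hlr, fun c hc => by simpa using hcnt c hc, fun c _ t ht => by simp at ht,
      fun j _ _ => rfl⟩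
  | cons s t ih =>
    intro cnt res pos hlc hlr hks hcnt hub hdisj
    have hv := hks s (by simp)
    have he_lt : eIdx n (kvf s) < n := eIdx_lt n (kvf s) hv.1 hv.2
    have hfilt : ∀ c : Nat, (s :: t).filter (fun x => decide (eIdx n (kvf x) = c))
        = (if eIdx n (kvf s) = c then [s] else []) ++ t.filter (fun x => decide (eIdx n (kvf x) = c)) := by
      intro c
      by_cases he : eIdx n (kvf s) = c
      · rw [List.filter_cons_of_pos (by simp [he]), if_pos he]; rfl
      · rw [List.filter_cons_of_neg (by simp [he]), if_neg he]; rfl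
    have hflen : ∀ c : Nat, ((s :: t).filter (fun x => decide (eIdx n (kvf x) = c))).length
        = (if eIdx n (kvf s) = c then 1 else 0) + (t.filter (fun x => decide (eIdx n (kvf x) = c))).length := by
      intro c; rw [hfilt c]; by_cases he : eIdx n (kvf s) = c <;> simp [he] <;> omega
    obtain ⟨IH1, IH2, IH3, IH4, IH5⟩ := ih cnt res
      (fun c => pos c + (if eIdx n (kvf s) = c then 1 else 0)) hlc hlr
      (fun x hx => hks x (by simp [hx]))
      (fun c hc => by
        have := hcnt c hc; rw [hflen c] at this; beta_reduce; push_cast at this ⊢; omega)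
      (fun c hc => by
        have := hub c hc; rw [hflen c] at this; beta_reduce; omega)
      (fun c hc c' hc' hne => by
        have := hdisj c hc c' hc' hne; rw [hflen c, hflen c'] at this; beta_reduce; omega)
    rw [List.foldr_cons]
    set r := t.foldr (stepA kvf) (cnt, res) with hrdef
    have hcv : PySem.List.pyGetD r.1 (kvf s) 0 - 1 = ((pos (eIdx n (kvf s)) : Nat) : Int) := by
      rw [pyGetD_eIdx _ _ _ (by rw [IH1]; exact hv.1) (by rw [IH1]; exact hv.2), IH1,
        IH3 (eIdx n (kvf s)) he_lt, if_pos rfl]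
      push_cast
      ring
    have hstep : stepA kvf s r
        = (r.1.set (eIdx n (kvf s)) ((pos (eIdx n (kvf s)) : Nat) : Int),
           r.2.set (pos (eIdx n (kvf s))) s) := by
      rw [stepA]
      rw [hcv, pySetD_eIdx _ _ _ (by rw [IH1]; exact hv.1) (by rw [IH1]; exact hv.2), IH1]
      rw [PySem.List.pySetD_of_nonneg _ _ (Int.natCast_nonneg _)]
      simp
    rw [hstep]
    have hlen_e : 1 ≤ ((s :: t).filter (fun x => decide (eIdx n (kvf x) = eIdx n (kvf s)))).length := by
      rw [hflen, if_pos rfl]; omega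
    have hpos_e : pos (eIdx n (kvf s)) < n := by
      have := hub (eIdx n (kvf s)) he_lt; omega
    refine ⟨by simp [IH1], by simp [IH2], fun c hc => ?_, fun c hc t' ht' => ?_, fun j hj hout => ?_⟩
    · by_cases he : eIdx n (kvf s) = c
      · subst he
        rw [getD_set_self _ _ _ _ (by rw [IH1]; exact he_lt)]
      · rw [getD_set_ne _ _ _ _ _ he, IH3 c hc, if_neg he]
        simp
    · by_cases he : eIdx n (kvf s) = c
      · subst he
        rw [hfilt, if_pos rfl]
        rcases Nat.eq_zero_or_pos t' with h0 | h0
        · subst h0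
          rw [Nat.add_zero, getD_set_self _ _ _ _ (by rw [IH2]; exact hpos_e)]
          rfl
        · obtain ⟨u, rfl⟩ : ∃ u, t' = u + 1 := ⟨t' - 1, by omega⟩
          rw [getD_set_ne _ _ _ _ _ (by omega)]
          have hu : u < (t.filter (fun x => decide (eIdx n (kvf x) = eIdx n (kvf s)))).length := by
            rw [hflen, if_pos rfl] at ht'; omega
          have := IH4 (eIdx n (kvf s)) he_lt u hu
          rw [if_pos rfl] at this
          rw [show pos (eIdx n (kvf s)) + (u + 1) = pos (eIdx n (kvf s)) + 1 + u by omega, this]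
          rfl
      · have hlt : t' < (t.filter (fun x => decide (eIdx n (kvf x) = c))).length := by
          rw [hflen, if_neg he] at ht'; omega
        have hne : pos (eIdx n (kvf s)) ≠ pos c + t' := by
          rcases hdisj c hc (eIdx n (kvf s)) he_lt (fun h => he h.symm) with h | h
          · rw [hflen, if_neg he] at h; omega
          · rw [hflen, if_pos rfl] at h; omega
        rw [getD_set_ne _ _ _ _ _ hne]
        have := IH4 c hc t' hlt
        rw [if_neg he] at this
        simp only [Nat.add_zero] at this
        rw [this, hfilt, if_neg he]
        rfl
    · have hne : pos (eIdx n (kvf s)) ≠ j := by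
        rcases hout (eIdx n (kvf s)) he_lt with h | h
        · omega
        · rw [hflen, if_pos rfl] at h; omega
      rw [getD_set_ne _ _ _ _ _ hne]
      apply IH5 j hj
      intro c hc
      rcases hout c hc with h | h
      · left; omega
      · right; rw [hflen] at h; omega

-- a list of length n whose segments agree with the buckets IS the flattened buckets
theorem assemble (n : Nat) (key : Int → Nat) (ss : List Int)
    (hk : ∀ s ∈ ss, key s < n) (hlen : ss.length = n) :
    ∀ (r : List Int), r.length = n →
    (∀ c < n, ∀ t < (bucket key ss c).length,
       r.getD (PosB key ss c + t) 0 = (bucket key ss c).getD t 0) →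
    r = FlatN key ss n := by
  intro r hr hseg
  have hPn : PosB key ss n = n := by rw [PosB_total key ss n hk, hlen]
  have main : ∀ c, c ≤ n → r.take (PosB key ss c) = FlatN key ss c := by
    intro c
    induction c with
    | zero => intro _; simp [PosB, FlatN]
    | succ c ihc =>
      intro hc
      have hub : PosB key ss c + (bucket key ss c).length ≤ n := by
        rw [← PosB_succ, ← hPn]
        exact PosB_mono key ss hc
      rw [PosB_succ, List.take_add, ihc (by omega)]
      have hFn : FlatN key ss (c + 1) = FlatN key ss c ++ bucket key ss c := by
        simp [FlatN, List.range_succ]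
      rw [hFn]
      congr 1
      apply List.ext_getElem
      · simp [hr]; omega
      · intro t ht1 ht2
        have htb : t < (bucket key ss c).length := by simp [hr] at ht1; omega
        have hpt : PosB key ss c + t < r.length := by rw [hr]; omega
        rw [List.getElem_take, List.getElem_drop]
        have := hseg c (by omega) t htb
        rw [List.getD_eq_getElem _ _ hpt, List.getD_eq_getElem _ _ htb] at this
        exact this
  have := main n le_rfl
  rw [hPn] at this
  rw [← this, ← hr, List.take_length]

theorem sum_map_natCastInt (l : List Nat) (g : Nat → Nat) :
    (l.map (fun j => ((g j : Nat) : Int))).sum = (((l.map g).sum : Nat) : Int) := by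
  induction l with
  | nil => simp
  | cons a t ih => simp [ih]

theorem getD_replicate_zero (n c : Nat) : (List.replicate n (0 : Int)).getD c 0 = 0 := by
  simp [List.getD_eq_getElem?_getD, List.getElem?_replicate]
  split_ifs <;> simp

theorem getD_replicate_nil (n c : Nat) : (List.replicate n ([] : List Int)).getD c [] = [] := by
  simp [List.getD_eq_getElem?_getD, List.getElem?_replicate]
  split_ifs <;> simp

theorem foldA_eq (n : Nat) (order kelas : List Int) (L : Int) (init : List Int × List Int) :
    (List.range n).reverse.foldl (fun (p : List Int × List Int) i =>
      let start := PySem.Int.mod (order.getD i 0 - L + (n : Int)) (n : Int)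
      let cl := kelas.getD start.toNat 0
      let cv := PySem.List.pyGetD p.1 cl 0 - 1
      (PySem.List.pySetD p.1 cl cv, PySem.List.pySetD p.2 cv start)) init
    = ((List.range n).map (fun i => PySem.Int.mod (order.getD i 0 - L + (n : Int)) (n : Int))).foldr
        (stepA (fun s => kelas.getD s.toNat 0)) init := by
  rw [List.foldl_reverse, List.foldr_map]
  rfl

theorem foldB_eq (n : Nat) (order kelas : List Int) (L : Int) (init : List (List Int)) :
    (List.range n).foldl (fun bs i =>
      let start := PySem.Int.mod (order.getD i 0 - L + (n : Int)) (n : Int)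
      let cl := kelas.getD start.toNat 0
      PySem.List.pySetD bs cl (PySem.List.pyGetD bs cl [] ++ [start])) init
    = ((List.range n).map (fun i => PySem.Int.mod (order.getD i 0 - L + (n : Int)) (n : Int))).foldl
        (fun bs s => PySem.List.pySetD bs (kelas.getD s.toNat 0)
          (PySem.List.pyGetD bs (kelas.getD s.toNat 0) [] ++ [s])) init := by
  rw [List.foldl_map]

-- ===== VERDICT (by name: the statement is the Claim_ definition above) =====
theorem update_order_spec : Claim_equal_update_order := by
  intro text L order kelas _ hPre
  unfold Spec_update_order
  obtain ⟨hO, hK, hKV, hND⟩ := hPre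
  by_cases hn0 : text.toList.length = 0
  · simp [update_order, update_order_alt, hn0]
  · have hnpos : 0 < text.toList.length := Nat.pos_of_ne_zero hn0
    simp only [update_order, update_order_alt]
    set n := text.toList.length with hnn
    set f : Nat → Int := fun i => PySem.Int.mod (order.getD i 0 - L + (n : Int)) (n : Int) with hf
    set kvf : Int → Int := fun s => kelas.getD s.toNat 0 with hkvf
    set starts : List Int := (List.range n).map f with hstarts
    have hlenst : starts.length = n := by simp [hstarts]
    have hrange : ∀ i : Nat, 0 ≤ f i ∧ f i < (n : Int) := by
      intro i
      constructor
      · exact PySem.Int.mod_nonneg _ (by exact_mod_cast hnpos)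
      · exact PySem.Int.mod_lt _ (by exact_mod_cast hnpos)
    have hsmem : ∀ s ∈ starts, 0 ≤ s ∧ s < (n : Int) := by
      intro s hs
      rcases List.mem_map.1 hs with ⟨i, _, rfl⟩
      exact hrange i
    have hks : ∀ s ∈ starts, -(n : Int) ≤ kvf s ∧ kvf s < (n : Int) := by
      intro s hs
      have h1 := hsmem s hs
      exact hKV s.toNat (by omega)
    have hK_lt : ∀ s ∈ starts, eIdx n (kvf s) < n := by
      intro s hs
      have := hks s hs
      exact eIdx_lt n (kvf s) this.1 this.2
    have hnd : starts.Nodup := hND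
    have htn : (starts.map Int.toNat).Nodup := by
      apply List.Nodup.map_on _ hnd
      intro a ha b hb hab
      have h1 := hsmem a ha
      have h2 := hsmem b hb
      omega
    have hsub : starts.map Int.toNat ⊆ List.range n := by
      intro x hx
      rcases List.mem_map.1 hx with ⟨s, hs, rfl⟩
      have := hsmem s hs
      exact List.mem_range.2 (by omega)
    have hperm : (starts.map Int.toNat).Perm (List.range n) :=
      (htn.subperm hsub).perm_of_length_le (by simp [hlenst])
    set cs1 : List Nat := (List.range n).map (fun i => eIdx n (kelas.getD i 0)) with hcs1
    have hcsperm : (starts.map (fun s => eIdx n (kvf s))).Perm cs1 := by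
      have h := hperm.map (fun j => eIdx n (kelas.getD j 0))
      rw [List.map_map] at h
      exact h
    have hbucket : ∀ c, starts.filter (fun s => decide (eIdx n (kvf s) = c))
        = bucket (fun s => eIdx n (kvf s)) starts c := fun _ => rfl
    have hPn : PosB (fun s => eIdx n (kvf s)) starts n = n := by
      rw [PosB_total _ _ _ hK_lt, hlenst]
    -- histogram
    obtain ⟨hh1, hh2⟩ := histLoop n kelas (List.range n) (List.replicate n 0) (by simp)
      (fun i hi => hKV i (List.mem_range.1 hi))
    -- prefix sums
    obtain ⟨hp1, hp2, hp3⟩ := psumLoop (n - 1)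
      ((List.range n).foldl (fun cnt i =>
        PySem.List.pySetD cnt (kelas.getD i 0)
          (PySem.List.pyGetD cnt (kelas.getD i 0) 0 + 1)) (List.replicate n (0 : Int)))
      (by rw [hh1]; omega)
    set count2 : List Int := (List.range' 1 (n - 1)).foldl (fun cnt i => cnt.set i (cnt.getD i 0 + cnt.getD (i - 1) 0))
      ((List.range n).foldl (fun cnt i =>
        PySem.List.pySetD cnt (kelas.getD i 0)
          (PySem.List.pyGetD cnt (kelas.getD i 0) 0 + 1)) (List.replicate n (0 : Int))) with hcount2
    have hcnt2 : ∀ c < n, count2.getD c 0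
        = ((PosB (fun s => eIdx n (kvf s)) starts c : Nat) : Int)
          + ((starts.filter (fun s => decide (eIdx n (kvf s) = c))).length : Int) := by
      intro c hc
      rw [hcount2, hp2 c (by omega)]
      rw [List.map_congr_left (fun j hj => by
        rw [hh2 j (by have := List.mem_range.1 hj; omega), getD_replicate_zero, zero_add])]
      rw [sum_map_natCastInt, sum_count_eq_countP, ← hcsperm.countP_eq, countP_lt_succ,
        ← PosB_eq_countP, hbucket c, bucket_length]
      push_cast
      ring
    have hub' : ∀ c < n, PosB (fun s => eIdx n (kvf s)) starts c
        + (starts.filter (fun s => decide (eIdx n (kvf s) = c))).length ≤ n := by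
      intro c hc
      rw [hbucket c, ← PosB_succ]
      have := PosB_mono (fun s => eIdx n (kvf s)) starts (show c + 1 ≤ n by omega)
      omega
    have hdisj' : ∀ c < n, ∀ c' < n, c ≠ c' →
        PosB (fun s => eIdx n (kvf s)) starts c
          + (starts.filter (fun s => decide (eIdx n (kvf s) = c))).length
          ≤ PosB (fun s => eIdx n (kvf s)) starts c' ∨
        PosB (fun s => eIdx n (kvf s)) starts c'
          + (starts.filter (fun s => decide (eIdx n (kvf s) = c'))).length
          ≤ PosB (fun s => eIdx n (kvf s)) starts c := by
      intro c hc c' hc' hne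
      rcases Nat.lt_or_ge c c' with h | h
      · left; rw [hbucket c, ← PosB_succ]; exact PosB_mono _ _ (by omega)
      · right; rw [hbucket c', ← PosB_succ]; exact PosB_mono _ _ (by omega)
    obtain ⟨hP1, hP2, hP3, hP4, hP5⟩ := placeLoop n kvf starts count2 (List.replicate n 0)
      (PosB (fun s => eIdx n (kvf s)) starts) (by rw [hcount2, hp1, hh1]) (by simp) hks hcnt2 hub' hdisj'
    -- A's result
    rw [foldA_eq]
    -- B's result
    rw [foldB_eq]
    obtain ⟨hb1, hb2⟩ := bucketLoop n kvf starts (List.replicate n ([] : List Int)) (by simp) hks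
    have hbsF : starts.foldl (fun bs s => PySem.List.pySetD bs (kvf s)
          (PySem.List.pyGetD bs (kvf s) [] ++ [s])) (List.replicate n ([] : List Int))
        = (List.range n).map (bucket (fun s => eIdx n (kvf s)) starts) := by
      apply List.ext_getElem
      · simp [hb1]
      · intro c h1 h2
        rw [← List.getD_eq_getElem _ ([] : List Int) h1]
        rw [hb2 c (by rw [hb1] at h1; exact h1), getD_replicate_nil]
        simp only [List.getElem_map, List.getElem_range]
        rw [hbucket c]
        rfl
    rw [hbsF]
    apply assemble n (fun s => eIdx n (kvf s)) starts hK_lt hlenst _ hP2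
    intro c hc t ht
    have := hP4 c hc t (by rw [← hbucket c] at ht; exact ht)
    rw [hbucket c] at this
    exact this
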